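-- pv_equiv track=rewrite | github.com/kawakamir/study-cracking-the-coding | chapter4/4-9.py | create_candidate_list
-- ===== SOURCE A (Python) =====
-- def create_candidate_list(separeted_dict, level, target_list):
--     try:
--         separeted_dict[level]
--     except KeyError:
--         yield target_list
--         return
--     separeted_list = separeted_dict[level]
--     for each_list in permutationGeneratorRecursive(separeted_list, len(separeted_list)):
--         yield from create_candidate_list(separeted_dict, level + 1, target_list + each_list)
--
-- def permutationGeneratorRecursive(data, r):
--     if r <= 0 or r > len(data):
--         return []
--
--     return _permutationGeneratorRecursive(data, r, [])
--
-- def _permutationGeneratorRecursive(data, r, progress):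
--     if r == 0:
--         yield progress
--         return
--
--     for i in range(len(data)):
--         yield from _permutationGeneratorRecursive(listExcludedIndices(data, [i]), r - 1, progress + [data[i]])
--
-- def listExcludedIndices(data, indices):
--     return [x for i, x in enumerate(data) if i not in indices]
-- ===== SOURCE B (Python) =====
-- def create_candidate_list(separeted_dict, level, target_list):
--     # Iterative: fold a running product of per-level permutations instead of A's double recursion.
--     results = [target_list]
--     lv = level
--     while lv in separeted_dict:
--         perms = _perms(separeted_dict[lv])
--         results = [r + p for r in results for p in perms]
--         lv += 1
--     yield from results
--
-- def _perms(data):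
--     # all full-length permutations in selection order; [] for empty data (matching A's quirkless [])
--     if not data:
--         return []
--     parts = [([], data)]
--     for _ in range(len(data)):
--         parts = [(chosen + [rest[i]], rest[:i] + rest[i+1:])
--                  for chosen, rest in parts for i in range(len(rest))]
--     return [chosen for chosen, _ in parts]
-- ===== Notes on version B (the rewrite author's own statement) =====
-- stated objective: alternative
-- what changed: Replaces A's double recursion (recursive generator over levels + recursive permutation generator) with an iterative level-by-level fold that multiplies a running result list by each level's permutations, the permutations themselves built by an iterative selection-step loop instead of recursion.
import Mathlib
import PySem

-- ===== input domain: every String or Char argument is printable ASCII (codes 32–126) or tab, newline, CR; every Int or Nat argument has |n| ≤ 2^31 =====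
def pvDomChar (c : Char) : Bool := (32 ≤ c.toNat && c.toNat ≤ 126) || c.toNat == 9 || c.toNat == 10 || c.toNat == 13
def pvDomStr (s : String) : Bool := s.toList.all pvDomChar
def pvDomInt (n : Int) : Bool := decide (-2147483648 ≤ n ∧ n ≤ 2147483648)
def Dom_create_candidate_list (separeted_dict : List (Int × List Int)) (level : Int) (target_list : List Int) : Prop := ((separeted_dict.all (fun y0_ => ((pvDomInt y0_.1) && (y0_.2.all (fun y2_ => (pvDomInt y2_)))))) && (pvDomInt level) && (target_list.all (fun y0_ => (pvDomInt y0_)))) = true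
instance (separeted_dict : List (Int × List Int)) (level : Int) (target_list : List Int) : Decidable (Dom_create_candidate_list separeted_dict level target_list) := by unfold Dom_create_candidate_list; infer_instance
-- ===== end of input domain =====

-- B replaces A's double recursion by an iterative product-fold over per-level permutations
-- built with an iterative selection-step loop (objective: alternative; return value proved equal).

-- level-lookup strictly shrinks the set of entries with key >= level (termination measure of both ports)
theorem pvLookup_filter_lt (d : List (Int × List Int)) (lv : Int) (l : List Int)
    (h : List.lookup lv d = some l) :
    (d.filter (fun p => decide (lv + 1 ≤ p.1))).length < (d.filter (fun p => decide (lv ≤ p.1))).length := by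
  induction d with
  | nil => simp [List.lookup] at h
  | cons x xs ih =>
    rw [List.lookup] at h
    by_cases hk : lv = x.1
    · have h1 : decide (lv ≤ x.1) = true := by simp; omega
      have h2 : decide (lv + 1 ≤ x.1) = false := by simp; omega
      simp only [List.filter_cons, h1, h2, List.length_cons, if_true]
      calc (xs.filter (fun p => decide (lv + 1 ≤ p.1))).length
          ≤ (xs.filter (fun p => decide (lv ≤ p.1))).length := by
            apply List.Sublist.length_le
            apply List.monotone_filter_right
            intro a ha; simp at ha ⊢; omega
        _ < (xs.filter (fun p => decide (lv ≤ p.1))).length + 1 := Nat.lt_succ_self _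
    · have hbe : (lv == x.1) = false := by simp [hk]
      rw [hbe] at h; simp only at h
      by_cases hle : lv ≤ x.1
      · have h1 : decide (lv ≤ x.1) = true := by simp; omega
        have h2 : decide (lv + 1 ≤ x.1) = true := by simp; omega
        simp only [List.filter_cons, h1, h2, List.length_cons, if_true]
        exact Nat.succ_lt_succ (ih h)
      · have h1 : decide (lv ≤ x.1) = false := by simp; omega
        have h2 : decide (lv + 1 ≤ x.1) = false := by simp; omega
        simp only [List.filter_cons, h1, h2]
        exact ih h

-- ===== PORT A =====
-- listExcludedIndices(data, indices)
def pvListExcludedIndices (data : List Int) (indices : List Int) : List Int :=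
  ((PySem.List.enumerate data).filter (fun p => !(indices.contains p.1))).map (·.2)

-- _permutationGeneratorRecursive(data, r, progress); r is a Nat here since A only calls it with r = len(data)
def pvPermRecA (data : List Int) (r : Nat) (progress : List Int) : List (List Int) :=
  match r with
  | 0 => [progress]
  | Nat.succ r' =>
    (List.range data.length).flatMap (fun i =>
      pvPermRecA (pvListExcludedIndices data [Int.ofNat i]) r' (progress ++ [PySem.List.pyGetD data (Int.ofNat i) 0]))

-- permutationGeneratorRecursive(data, r)
def pvPermGenA (data : List Int) (r : Int) : List (List Int) :=
  if r ≤ 0 ∨ r > data.length then [] else pvPermRecA data r.toNat []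

def create_candidate_list (separeted_dict : List (Int × List Int)) (level : Int) (target_list : List Int) : List (List Int) :=
  match h : List.lookup level separeted_dict with
  | none => [target_list]                         -- KeyError branch: yield target_list
  | some separeted_list =>
    (pvPermGenA separeted_list (separeted_list.length : Int)).flatMap (fun each_list =>
      create_candidate_list separeted_dict (level + 1) (target_list ++ each_list))
termination_by (separeted_dict.filter (fun p => decide (level ≤ p.1))).length
decreasing_by exact pvLookup_filter_lt _ _ _ h

-- ===== PORT B =====
-- _perms(data): iterative selection-step loop; rest[:i] + rest[i+1:] ported as take/drop (i ≥ 0, so exact)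
def pvPermsB (data : List Int) : List (List Int) :=
  if data.isEmpty then []
  else
    ((List.range data.length).foldl
      (fun parts _ => parts.flatMap (fun cr =>
        (List.range cr.2.length).map (fun i =>
          (cr.1 ++ [PySem.List.pyGetD cr.2 (Int.ofNat i) 0], cr.2.take i ++ cr.2.drop (i + 1)))))
      [(([] : List Int), data)]).map (·.1)

-- the while-loop of B, with `results` as the loop state
def pvGoB (separeted_dict : List (Int × List Int)) (lv : Int) (results : List (List Int)) : List (List Int) :=
  match h : List.lookup lv separeted_dict with
  | none => results
  | some lst => pvGoB separeted_dict (lv + 1) (results.flatMap (fun r => (pvPermsB lst).map (fun p => r ++ p)))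
termination_by (separeted_dict.filter (fun p => decide (lv ≤ p.1))).length
decreasing_by exact pvLookup_filter_lt _ _ _ h

def create_candidate_list_alt (separeted_dict : List (Int × List Int)) (level : Int) (target_list : List Int) : List (List Int) :=
  pvGoB separeted_dict level [target_list]

-- ===== PRECONDITION & SPEC =====
def Spec_create_candidate_list (separeted_dict : List (Int × List Int)) (level : Int) (target_list : List Int) (out : List (List Int)) : Prop := out = create_candidate_list_alt separeted_dict level target_list
instance (separeted_dict : List (Int × List Int)) (level : Int) (target_list : List Int) (out : List (List Int)) : Decidable (Spec_create_candidate_list separeted_dict level target_list out) := by unfold Spec_create_candidate_list; infer_instance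

-- ===== CLAIM (what is proved, stated in full; the proofs are below) =====
def Claim_equal_create_candidate_list : Prop := ∀ (separeted_dict : List (Int × List Int)) (level : Int) (target_list : List Int), Dom_create_candidate_list separeted_dict level target_list → Spec_create_candidate_list separeted_dict level target_list (create_candidate_list separeted_dict level target_list)

-- ===== LEMMAS AND PROOFS =====

-- B's one selection step, named for the proofs
def pvStepB (parts : List (List Int × List Int)) : List (List Int × List Int) :=
  parts.flatMap (fun cr =>
    (List.range cr.2.length).map (fun i =>
      (cr.1 ++ [PySem.List.pyGetD cr.2 (Int.ofNat i) 0], cr.2.take i ++ cr.2.drop (i + 1))))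

theorem pvFoldl_range_eq_iterate (f : List (List Int × List Int) → List (List Int × List Int))
    (n : Nat) (init : List (List Int × List Int)) :
    (List.range n).foldl (fun s _ => f s) init = f^[n] init := by
  induction n generalizing init with
  | zero => simp
  | succ n ih =>
    rw [List.range_succ, List.foldl_append, ih]
    simp [Function.iterate_succ_apply']

theorem pvStepB_iterate_flatMap (r : Nat) (l : List (List Int × List Int)) :
    pvStepB^[r] l = l.flatMap (fun x => pvStepB^[r] [x]) := by
  induction r generalizing l with
  | zero => simp
  | succ r ih =>
    have hx : ∀ m : List (List Int × List Int),
        pvStepB^[r + 1] m = (pvStepB m).flatMap (fun y => pvStepB^[r] [y]) := by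
      intro m; rw [Function.iterate_succ_apply, ih]
    have hstep : pvStepB l = l.flatMap (fun x => pvStepB [x]) := by
      simp [pvStepB]
    rw [hx l]
    simp only [hx]
    rw [hstep, List.flatMap_assoc]

-- excluding index i equals take i ++ drop (i+1)
theorem pvExcl_eq_take_drop (d : List Int) (i : Nat) (s : Int) :
    ((PySem.List.enumerate d s).filter (fun p => !([s + (i : Int)].contains p.1))).map (·.2)
      = d.take i ++ d.drop (i + 1) := by
  induction d generalizing s i with
  | nil => simp [PySem.List.enumerate_nil]
  | cons x xs ih =>
    rw [PySem.List.enumerate_cons]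
    cases i with
    | zero =>
      rw [List.filter_cons]
      have hhead : (!([s + ((0 : Nat) : Int)].contains s)) = false := by simp
      simp only [hhead, Bool.false_eq_true, if_false]
      have hall : ∀ p ∈ PySem.List.enumerate xs (s + 1), (!([s + ((0 : Nat) : Int)].contains p.1)) = true := by
        intro p hp
        rcases (PySem.List.mem_enumerate_iff xs (s + 1) p).1 hp with ⟨k, hk, rfl⟩
        simp; omega
      rw [List.filter_eq_self.2 hall, PySem.List.map_snd_enumerate]
      simp
    | succ j =>
      rw [List.filter_cons]
      have hhead : (!([s + ((j + 1 : Nat) : Int)].contains s)) = true := by simp; omega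
      simp only [hhead, if_true, List.map_cons]
      have harg : s + ((j + 1 : Nat) : Int) = (s + 1) + (j : Int) := by push_cast; ring
      rw [harg, ih j (s + 1)]
      simp

theorem pvExcl_zero (d : List Int) (i : Nat) :
    pvListExcludedIndices d [Int.ofNat i] = d.take i ++ d.drop (i + 1) := by
  have h := pvExcl_eq_take_drop d i 0
  simp only [zero_add] at h
  simpa [pvListExcludedIndices, Int.ofNat_eq_natCast] using h

-- iterated B-steps compute A's recursive permutation helper
theorem pvIterate_eq_permRecA (r : Nat) (c d : List Int) :
    (pvStepB^[r] [(c, d)]).map (·.1) = pvPermRecA d r c := by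
  induction r generalizing c d with
  | zero => simp [pvPermRecA]
  | succ r ih =>
    rw [Function.iterate_succ_apply]
    rw [pvStepB_iterate_flatMap]
    have hsingle : pvStepB [(c, d)] =
        (List.range d.length).map (fun i =>
          (c ++ [PySem.List.pyGetD d (Int.ofNat i) 0], d.take i ++ d.drop (i + 1))) := by
      simp [pvStepB]
    rw [hsingle, List.flatMap_map, List.map_flatMap]
    have hpt : ∀ i : Nat,
        (pvStepB^[r] [(c ++ [PySem.List.pyGetD d (Int.ofNat i) 0], d.take i ++ d.drop (i + 1))]).map (·.1)
          = pvPermRecA (pvListExcludedIndices d [Int.ofNat i]) r (c ++ [PySem.List.pyGetD d (Int.ofNat i) 0]) := by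
      intro i; rw [pvExcl_zero, ih]
    
    rw [show pvPermRecA d (r + 1) c =
        (List.range d.length).flatMap (fun i =>
          pvPermRecA (pvListExcludedIndices d [Int.ofNat i]) r (c ++ [PySem.List.pyGetD d (Int.ofNat i) 0])) from rfl]
    exact List.flatMap_congr (fun i _ => hpt i)

-- B's permutation list equals A's
theorem pvPermsB_eq (lst : List Int) : pvPermsB lst = pvPermGenA lst (lst.length : Int) := by
  unfold pvPermsB pvPermGenA
  by_cases hnil : lst = []
  · subst hnil; simp
  · have hlen : 0 < lst.length := List.length_pos_of_ne_nil hnil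
    have hempty : lst.isEmpty = false := by simp [hnil]
    have hguard : ¬ ((lst.length : Int) ≤ 0 ∨ (lst.length : Int) > (lst.length : Int)) := by
      simp; omega
    rw [hempty, if_neg hguard]
    simp only [Bool.false_eq_true, if_false]
    rw [show ((List.range lst.length).foldl
        (fun parts _ => parts.flatMap (fun cr =>
          (List.range cr.2.length).map (fun i =>
            (cr.1 ++ [PySem.List.pyGetD cr.2 (Int.ofNat i) 0], cr.2.take i ++ cr.2.drop (i + 1)))))
        [(([] : List Int), lst)]) = pvStepB^[lst.length] [(([] : List Int), lst)]
      from pvFoldl_range_eq_iterate pvStepB lst.length _]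
    rw [show ((lst.length : Int)).toNat = lst.length from rfl]
    exact pvIterate_eq_permRecA lst.length [] lst

-- the while loop accumulates exactly A's recursion over every seed in `results`
theorem pvGoB_eq : ∀ (n : Nat) (d : List (Int × List Int)) (lv : Int) (results : List (List Int)),
    (d.filter (fun p => decide (lv ≤ p.1))).length = n →
    pvGoB d lv results = results.flatMap (fun r => create_candidate_list d lv r) := by
  intro n
  induction n using Nat.strong_induction_on with
  | _ n ih =>
    intro d lv results hn
    rw [pvGoB.eq_def]
    split
    case _ h =>
      have hA : ∀ r : List Int, create_candidate_list d lv r = [r] := by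
        intro r; rw [create_candidate_list.eq_def]; split
        · rfl
        · next h' => rw [h] at h'; exact absurd h' (by simp)
      simp [hA]
    case _ lst h =>
      have hlt := pvLookup_filter_lt d lv lst h
      rw [ih _ (by omega) d (lv + 1) _ rfl]
      have hA : ∀ r : List Int, create_candidate_list d lv r =
          (pvPermsB lst).flatMap (fun p => create_candidate_list d (lv + 1) (r ++ p)) := by
        intro r
        rw [create_candidate_list.eq_def]
        split
        · next h' => rw [h] at h'; exact absurd h' (by simp)
        · next lst' h' =>
          rw [h] at h'
          cases h'
          rw [pvPermsB_eq]
      simp only [hA]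
      rw [List.flatMap_assoc]
      exact List.flatMap_congr (fun r _ => by rw [List.flatMap_map])

-- ===== VERDICT (by name: the statement is the Claim_ definition above) =====
theorem create_candidate_list_spec : Claim_equal_create_candidate_list := by
  intro d lv tl _
  unfold Spec_create_candidate_list create_candidate_list_alt
  rw [pvGoB_eq _ d lv [tl] rfl]
  simp
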